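-- pv_equiv track=rewrite | github.com/samensah/Pattern-Avoidance | pattern_avoidance.py | locate_all_indices
-- ===== SOURCE A (Python) =====
-- def locate_all_indices(perm, pattern):
--     """
--     Output all the lists of indices where pattern occurs in permutation and the subsequence of the pattern itself
--
--     @param perm: permutation
--     @param pattern: classical pattern of length 3
--     @return: a list of lists containing index corresponding to pattern and a list of index value
--     >>> locate_all_indices([3, 2, 1], [3, 2, 1])
--     ... [[[0, 1, 2], [3, 2, 1]]]
--     """
--     indices_of_perm = []
--     count = 0
--     for i in range(len(perm)-2):
--         for j in range(i+1, len(perm)-1):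
--             for k in range(j+1, len(perm)):
--                 if (pattern == [1, 2, 3]) and (perm[i] < perm[j]) and (perm[j] < perm[k]):
--                     indices_of_perm.append([[i, j, k], [perm[i], perm[j], perm[k]]])
--                     count += 1
--                 elif (pattern == [2, 3, 1]) and (perm[i] < perm[j]) and (perm[j] > perm[k]) and (perm[i] > perm[k]):
--                     indices_of_perm.append([[i, j, k], [perm[i], perm[j], perm[k]]])
--                     count += 1
--                 elif (pattern == [3, 1, 2]) and (perm[i] > perm[j]) and (perm[j] < perm[k]) and (perm[i] > perm[k]):
--                     indices_of_perm.append([[i, j, k], [perm[i], perm[j], perm[k]]])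
--                     count += 1
--                 elif (pattern == [1, 3, 2]) and (perm[i] < perm[j]) and (perm[j] > perm[k]) and (perm[i] < perm[k]):
--                     indices_of_perm.append([[i, j, k], [perm[i], perm[j], perm[k]]])
--                     count += 1
--                 elif (pattern == [2, 1, 3]) and (perm[i] > perm[j]) and (perm[j] < perm[k]) and (perm[i] < perm[k]):
--                     indices_of_perm.append([[i, j, k], [perm[i], perm[j], perm[k]]])
--                     count += 1
--                 elif (pattern == [3, 2, 1]) and (perm[i] > perm[j]) and (perm[j] > perm[k]):
--                     indices_of_perm.append([[i, j, k], [perm[i], perm[j], perm[k]]])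
--                     count += 1
--     if count != 0:
--         return indices_of_perm
--     return []
-- ===== SOURCE B (Python) =====
-- def locate_all_indices(perm, pattern):
--     # invalid patterns (anything that is not a rearrangement of 1,2,3) match nothing
--     if sorted(pattern) != [1, 2, 3]:
--         return []
--     # comparison signature of the pattern: the three strict '<' facts between its slots
--     w01, w12, w02 = pattern[0] < pattern[1], pattern[1] < pattern[2], pattern[0] < pattern[2]
--     n = len(perm)
--     # stage 1: index pairs i < j whose values are distinct and compare like slots 0 and 1
--     duos = [(i, j)
--             for i in range(n - 2) for j in range(i + 1, n - 1)
--             if perm[i] != perm[j] and (perm[i] < perm[j]) == w01]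
--     # stage 2: extend each surviving pair with a third index k
--     trios = [(i, j, k)
--              for (i, j) in duos for k in range(j + 1, n)
--              if perm[j] != perm[k] and perm[i] != perm[k]
--              and (perm[j] < perm[k]) == w12 and (perm[i] < perm[k]) == w02]
--     # stage 3: format the answer
--     return [[[i, j, k], [perm[i], perm[j], perm[k]]] for (i, j, k) in trios]
-- ===== Notes on version B (the rewrite author's own statement) =====
-- stated objective: faster
-- what changed: A's single triple-nested accumulation over six hard-coded pattern branches is replaced by a staged pipeline: validate the pattern once by sorting, precompute its three-comparison signature, build the list of index pairs matching the first comparison, extend only surviving pairs with a third index, then format; pairs failing the first comparison never reach the inner scan, and invalid patterns return [] without scanning.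
import Mathlib
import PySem

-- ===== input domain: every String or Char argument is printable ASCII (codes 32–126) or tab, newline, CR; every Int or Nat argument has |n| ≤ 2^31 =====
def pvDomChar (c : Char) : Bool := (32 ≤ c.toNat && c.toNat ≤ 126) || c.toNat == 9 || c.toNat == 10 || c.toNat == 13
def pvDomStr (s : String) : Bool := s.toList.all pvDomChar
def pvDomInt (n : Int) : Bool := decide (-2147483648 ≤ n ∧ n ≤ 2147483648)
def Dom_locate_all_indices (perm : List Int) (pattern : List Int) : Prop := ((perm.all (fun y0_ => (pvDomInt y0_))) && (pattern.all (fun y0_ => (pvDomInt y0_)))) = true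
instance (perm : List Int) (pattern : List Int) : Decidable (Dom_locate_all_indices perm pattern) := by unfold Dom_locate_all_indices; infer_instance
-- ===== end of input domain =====

-- B replaces A's single triple-nested accumulation over six hard-coded branches by a
-- staged pipeline: validate the pattern once via sorting, precompute its comparison
-- signature, build the list of matching index PAIRS, extend each pair with a third
-- index, then format (objective: alternative decomposition).

-- ===== PORT A =====
-- literal port of A: pair state (indices_of_perm, count), six-branch elif chain,
-- final 'if count != 0' check.  Indices produced by the ranges are always in
-- range, so perm[i] is ported with pyGetD (the default is never reached).
def locate_all_indices (perm : List Int) (pattern : List Int) : List (List (List Int)) :=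
  let n : Int := perm.length
  let st :=
    (PySem.List.pyRange 0 (n - 2) 1).foldl (fun st i =>
      (PySem.List.pyRange (i + 1) (n - 1) 1).foldl (fun st j =>
        (PySem.List.pyRange (j + 1) n 1).foldl (fun st k =>
          let a := PySem.List.pyGetD perm i 0
          let b := PySem.List.pyGetD perm j 0
          let c := PySem.List.pyGetD perm k 0
          if pattern = [1, 2, 3] ∧ a < b ∧ b < c then
            (st.1 ++ [[[i, j, k], [a, b, c]]], st.2 + 1)
          else if pattern = [2, 3, 1] ∧ a < b ∧ b > c ∧ a > c then
            (st.1 ++ [[[i, j, k], [a, b, c]]], st.2 + 1)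
          else if pattern = [3, 1, 2] ∧ a > b ∧ b < c ∧ a > c then
            (st.1 ++ [[[i, j, k], [a, b, c]]], st.2 + 1)
          else if pattern = [1, 3, 2] ∧ a < b ∧ b > c ∧ a < c then
            (st.1 ++ [[[i, j, k], [a, b, c]]], st.2 + 1)
          else if pattern = [2, 1, 3] ∧ a > b ∧ b < c ∧ a < c then
            (st.1 ++ [[[i, j, k], [a, b, c]]], st.2 + 1)
          else if pattern = [3, 2, 1] ∧ a > b ∧ b > c then
            (st.1 ++ [[[i, j, k], [a, b, c]]], st.2 + 1)
          else st) st) st) (([] : List (List (List Int))), (0 : Int))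
  if st.2 ≠ 0 then st.1 else []

-- ===== PORT B =====
-- literal port of Source B: sorted-pattern guard, precomputed signature booleans,
-- pair comprehension (flatMap/filter/map), extension comprehension, format pass.
def locate_all_indices_alt (perm : List Int) (pattern : List Int) : List (List (List Int)) :=
  if PySem.List.sorted pattern (fun x => x) false ≠ [1, 2, 3] then []
  else
    let w01 : Bool := decide (PySem.List.pyGetD pattern 0 0 < PySem.List.pyGetD pattern 1 0)
    let w12 : Bool := decide (PySem.List.pyGetD pattern 1 0 < PySem.List.pyGetD pattern 2 0)
    let w02 : Bool := decide (PySem.List.pyGetD pattern 0 0 < PySem.List.pyGetD pattern 2 0)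
    let n : Int := perm.length
    let duos : List (Int × Int) :=
      (PySem.List.pyRange 0 (n - 2) 1).flatMap (fun i =>
        ((PySem.List.pyRange (i + 1) (n - 1) 1).filter (fun j =>
          (PySem.List.pyGetD perm i 0 != PySem.List.pyGetD perm j 0) &&
          (decide (PySem.List.pyGetD perm i 0 < PySem.List.pyGetD perm j 0) == w01))).map (fun j => (i, j)))
    let trios : List (Int × Int × Int) :=
      duos.flatMap (fun p =>
        ((PySem.List.pyRange (p.2 + 1) n 1).filter (fun k =>
          (PySem.List.pyGetD perm p.2 0 != PySem.List.pyGetD perm k 0) &&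
          (PySem.List.pyGetD perm p.1 0 != PySem.List.pyGetD perm k 0) &&
          (decide (PySem.List.pyGetD perm p.2 0 < PySem.List.pyGetD perm k 0) == w12) &&
          (decide (PySem.List.pyGetD perm p.1 0 < PySem.List.pyGetD perm k 0) == w02))).map (fun k => (p.1, p.2, k)))
    trios.map (fun t => [[t.1, t.2.1, t.2.2],
      [PySem.List.pyGetD perm t.1 0, PySem.List.pyGetD perm t.2.1 0, PySem.List.pyGetD perm t.2.2 0]])

-- ===== PRECONDITION & SPEC =====
def Spec_locate_all_indices (perm : List Int) (pattern : List Int) (out : List (List (List Int))) : Prop := out = locate_all_indices_alt perm pattern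
instance (perm : List Int) (pattern : List Int) (out : List (List (List Int))) : Decidable (Spec_locate_all_indices perm pattern out) := by unfold Spec_locate_all_indices; infer_instance

-- ===== CLAIM (what is proved, stated in full; the proofs are below) =====
def Claim_equal_locate_all_indices : Prop := ∀ (perm : List Int) (pattern : List Int), Dom_locate_all_indices perm pattern → Spec_locate_all_indices perm pattern (locate_all_indices perm pattern)

-- ===== LEMMAS AND PROOFS =====

-- proof-side names: the per-triple condition (as a Bool) and emitted entry of A's loop body
def pvCond (pattern : List Int) (a b c : Int) : Bool :=
  decide ((pattern = [1, 2, 3] ∧ a < b ∧ b < c) ∨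
    (pattern = [2, 3, 1] ∧ a < b ∧ b > c ∧ a > c) ∨
    (pattern = [3, 1, 2] ∧ a > b ∧ b < c ∧ a > c) ∨
    (pattern = [1, 3, 2] ∧ a < b ∧ b > c ∧ a < c) ∨
    (pattern = [2, 1, 3] ∧ a > b ∧ b < c ∧ a < c) ∨
    (pattern = [3, 2, 1] ∧ a > b ∧ b > c))

def pvE (perm : List Int) (i j k : Int) : List (List Int) :=
  [[i, j, k], [PySem.List.pyGetD perm i 0, PySem.List.pyGetD perm j 0, PySem.List.pyGetD perm k 0]]

-- A's three loop levels as pure list folds (count dropped)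
def pvK (perm pattern : List Int) (i j : Int) (l : List (List (List Int))) (k : Int) : List (List (List Int)) :=
  if pvCond pattern (PySem.List.pyGetD perm i 0) (PySem.List.pyGetD perm j 0) (PySem.List.pyGetD perm k 0)
  then l ++ [pvE perm i j k] else l

def pvJ (perm pattern : List Int) (i : Int) (l : List (List (List Int))) (j : Int) : List (List (List Int)) :=
  (PySem.List.pyRange (j + 1) (perm.length : Int) 1).foldl (pvK perm pattern i j) l

def pvI (perm pattern : List Int) (l : List (List (List Int))) (i : Int) : List (List (List Int)) :=
  (PySem.List.pyRange (i + 1) ((perm.length : Int) - 1) 1).foldl (pvJ perm pattern i) l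

-- generic: a pair-state fold whose second component counts exactly the length
-- growth of the first component projects to the plain list fold.
theorem pv_fold_track {α β : Type} (g : (List β × Int) → α → (List β × Int))
    (h : List β → α → List β)
    (hg : ∀ l c x, g (l, c) x = (h l x, c + (((h l x).length : Int) - (l.length : Int)))) :
    ∀ (xs : List α) (l : List β) (c : Int),
      List.foldl g (l, c) xs = (List.foldl h l xs, c + (((List.foldl h l xs).length : Int) - (l.length : Int))) := by
  intro xs
  induction xs with
  | nil => intro l c; simp
  | cons x xs ih =>
    intro l c
    simp only [List.foldl_cons, hg]
    rw [ih]
    ring_nf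

-- A's six-branch elif chain with the count is pvK plus the length bookkeeping
set_option maxHeartbeats 4000000 in
theorem pv_stepk (perm pattern : List Int) (i j : Int) (l : List (List (List Int))) (c : Int) (k : Int) :
    (fun (st : List (List (List Int)) × Int) (k : Int) =>
          let a := PySem.List.pyGetD perm i 0
          let b := PySem.List.pyGetD perm j 0
          let c := PySem.List.pyGetD perm k 0
          if pattern = [1, 2, 3] ∧ a < b ∧ b < c then (st.1 ++ [[[i, j, k], [a, b, c]]], st.2 + 1)
          else if pattern = [2, 3, 1] ∧ a < b ∧ b > c ∧ a > c then (st.1 ++ [[[i, j, k], [a, b, c]]], st.2 + 1)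
          else if pattern = [3, 1, 2] ∧ a > b ∧ b < c ∧ a > c then (st.1 ++ [[[i, j, k], [a, b, c]]], st.2 + 1)
          else if pattern = [1, 3, 2] ∧ a < b ∧ b > c ∧ a < c then (st.1 ++ [[[i, j, k], [a, b, c]]], st.2 + 1)
          else if pattern = [2, 1, 3] ∧ a > b ∧ b < c ∧ a < c then (st.1 ++ [[[i, j, k], [a, b, c]]], st.2 + 1)
          else if pattern = [3, 2, 1] ∧ a > b ∧ b > c then (st.1 ++ [[[i, j, k], [a, b, c]]], st.2 + 1)
          else st) (l, c) k
      = (pvK perm pattern i j l k, c + (((pvK perm pattern i j l k).length : Int) - (l.length : Int))) := by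
  simp only [pvK, pvE]
  by_cases hc : pvCond pattern (PySem.List.pyGetD perm i 0) (PySem.List.pyGetD perm j 0)
      (PySem.List.pyGetD perm k 0) = true
  · have hd : (pattern = [1, 2, 3] ∧ PySem.List.pyGetD perm i 0 < PySem.List.pyGetD perm j 0 ∧ PySem.List.pyGetD perm j 0 < PySem.List.pyGetD perm k 0) ∨
        (pattern = [2, 3, 1] ∧ PySem.List.pyGetD perm i 0 < PySem.List.pyGetD perm j 0 ∧ PySem.List.pyGetD perm j 0 > PySem.List.pyGetD perm k 0 ∧ PySem.List.pyGetD perm i 0 > PySem.List.pyGetD perm k 0) ∨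
        (pattern = [3, 1, 2] ∧ PySem.List.pyGetD perm i 0 > PySem.List.pyGetD perm j 0 ∧ PySem.List.pyGetD perm j 0 < PySem.List.pyGetD perm k 0 ∧ PySem.List.pyGetD perm i 0 > PySem.List.pyGetD perm k 0) ∨
        (pattern = [1, 3, 2] ∧ PySem.List.pyGetD perm i 0 < PySem.List.pyGetD perm j 0 ∧ PySem.List.pyGetD perm j 0 > PySem.List.pyGetD perm k 0 ∧ PySem.List.pyGetD perm i 0 < PySem.List.pyGetD perm k 0) ∨
        (pattern = [2, 1, 3] ∧ PySem.List.pyGetD perm i 0 > PySem.List.pyGetD perm j 0 ∧ PySem.List.pyGetD perm j 0 < PySem.List.pyGetD perm k 0 ∧ PySem.List.pyGetD perm i 0 < PySem.List.pyGetD perm k 0) ∨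
        (pattern = [3, 2, 1] ∧ PySem.List.pyGetD perm i 0 > PySem.List.pyGetD perm j 0 ∧ PySem.List.pyGetD perm j 0 > PySem.List.pyGetD perm k 0) :=
      of_decide_eq_true hc
    simp only [if_pos hc]
    split_ifs <;>
      first
        | (exfalso; rcases hd with h | h | h | h | h | h <;> tauto)
        | (refine congrArg₂ Prod.mk rfl ?_; simp [List.length_append]; try omega)
  · have hd : ¬ ((pattern = [1, 2, 3] ∧ PySem.List.pyGetD perm i 0 < PySem.List.pyGetD perm j 0 ∧ PySem.List.pyGetD perm j 0 < PySem.List.pyGetD perm k 0) ∨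
        (pattern = [2, 3, 1] ∧ PySem.List.pyGetD perm i 0 < PySem.List.pyGetD perm j 0 ∧ PySem.List.pyGetD perm j 0 > PySem.List.pyGetD perm k 0 ∧ PySem.List.pyGetD perm i 0 > PySem.List.pyGetD perm k 0) ∨
        (pattern = [3, 1, 2] ∧ PySem.List.pyGetD perm i 0 > PySem.List.pyGetD perm j 0 ∧ PySem.List.pyGetD perm j 0 < PySem.List.pyGetD perm k 0 ∧ PySem.List.pyGetD perm i 0 > PySem.List.pyGetD perm k 0) ∨
        (pattern = [1, 3, 2] ∧ PySem.List.pyGetD perm i 0 < PySem.List.pyGetD perm j 0 ∧ PySem.List.pyGetD perm j 0 > PySem.List.pyGetD perm k 0 ∧ PySem.List.pyGetD perm i 0 < PySem.List.pyGetD perm k 0) ∨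
        (pattern = [2, 1, 3] ∧ PySem.List.pyGetD perm i 0 > PySem.List.pyGetD perm j 0 ∧ PySem.List.pyGetD perm j 0 < PySem.List.pyGetD perm k 0 ∧ PySem.List.pyGetD perm i 0 < PySem.List.pyGetD perm k 0) ∨
        (pattern = [3, 2, 1] ∧ PySem.List.pyGetD perm i 0 > PySem.List.pyGetD perm j 0 ∧ PySem.List.pyGetD perm j 0 > PySem.List.pyGetD perm k 0)) :=
      of_decide_eq_false ((Bool.not_eq_true _).mp hc)
    simp only [if_neg hc]
    split_ifs <;>
      first
        | (exfalso; apply hd;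
            first
              | exact Or.inl ‹_›
              | exact Or.inr (Or.inl ‹_›)
              | exact Or.inr (Or.inr (Or.inl ‹_›))
              | exact Or.inr (Or.inr (Or.inr (Or.inl ‹_›)))
              | exact Or.inr (Or.inr (Or.inr (Or.inr (Or.inl ‹_›))))
              | exact Or.inr (Or.inr (Or.inr (Or.inr (Or.inr ‹_›)))))
        | (refine congrArg₂ Prod.mk rfl ?_; simp)

theorem pv_trackk (perm pattern : List Int) (i j : Int) (l : List (List (List Int))) (c : Int) :
    List.foldl (fun (st : List (List (List Int)) × Int) (k : Int) =>
          let a := PySem.List.pyGetD perm i 0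
          let b := PySem.List.pyGetD perm j 0
          let c := PySem.List.pyGetD perm k 0
          if pattern = [1, 2, 3] ∧ a < b ∧ b < c then (st.1 ++ [[[i, j, k], [a, b, c]]], st.2 + 1)
          else if pattern = [2, 3, 1] ∧ a < b ∧ b > c ∧ a > c then (st.1 ++ [[[i, j, k], [a, b, c]]], st.2 + 1)
          else if pattern = [3, 1, 2] ∧ a > b ∧ b < c ∧ a > c then (st.1 ++ [[[i, j, k], [a, b, c]]], st.2 + 1)
          else if pattern = [1, 3, 2] ∧ a < b ∧ b > c ∧ a < c then (st.1 ++ [[[i, j, k], [a, b, c]]], st.2 + 1)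
          else if pattern = [2, 1, 3] ∧ a > b ∧ b < c ∧ a < c then (st.1 ++ [[[i, j, k], [a, b, c]]], st.2 + 1)
          else if pattern = [3, 2, 1] ∧ a > b ∧ b > c then (st.1 ++ [[[i, j, k], [a, b, c]]], st.2 + 1)
          else st) (l, c) (PySem.List.pyRange (j + 1) (perm.length : Int) 1)
      = (pvJ perm pattern i l j, c + (((pvJ perm pattern i l j).length : Int) - (l.length : Int))) := by
  simp only [pvJ]
  exact pv_fold_track _ _ (fun l' c' k => pv_stepk perm pattern i j l' c' k) _ l c

theorem pv_trackj (perm pattern : List Int) (i : Int) (l : List (List (List Int))) (c : Int) :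
    List.foldl (fun (st : List (List (List Int)) × Int) (j : Int) =>
        List.foldl (fun (st : List (List (List Int)) × Int) (k : Int) =>
          let a := PySem.List.pyGetD perm i 0
          let b := PySem.List.pyGetD perm j 0
          let c := PySem.List.pyGetD perm k 0
          if pattern = [1, 2, 3] ∧ a < b ∧ b < c then (st.1 ++ [[[i, j, k], [a, b, c]]], st.2 + 1)
          else if pattern = [2, 3, 1] ∧ a < b ∧ b > c ∧ a > c then (st.1 ++ [[[i, j, k], [a, b, c]]], st.2 + 1)
          else if pattern = [3, 1, 2] ∧ a > b ∧ b < c ∧ a > c then (st.1 ++ [[[i, j, k], [a, b, c]]], st.2 + 1)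
          else if pattern = [1, 3, 2] ∧ a < b ∧ b > c ∧ a < c then (st.1 ++ [[[i, j, k], [a, b, c]]], st.2 + 1)
          else if pattern = [2, 1, 3] ∧ a > b ∧ b < c ∧ a < c then (st.1 ++ [[[i, j, k], [a, b, c]]], st.2 + 1)
          else if pattern = [3, 2, 1] ∧ a > b ∧ b > c then (st.1 ++ [[[i, j, k], [a, b, c]]], st.2 + 1)
          else st) st (PySem.List.pyRange (j + 1) (perm.length : Int) 1))
        (l, c) (PySem.List.pyRange (i + 1) ((perm.length : Int) - 1) 1)
      = (pvI perm pattern l i, c + (((pvI perm pattern l i).length : Int) - (l.length : Int))) := by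
  simp only [pvI]
  apply pv_fold_track
  intro l' c' j
  exact pv_trackk perm pattern i j l' c'

-- A's value is the pure triple fold (the count test is redundant: count = length)
theorem pv_A_eq_fold (perm pattern : List Int) :
    locate_all_indices perm pattern
      = List.foldl (pvI perm pattern) [] (PySem.List.pyRange 0 ((perm.length : Int) - 2) 1) := by
  have h := pv_fold_track
    (fun (st : List (List (List Int)) × Int) (i : Int) =>
        List.foldl (fun (st : List (List (List Int)) × Int) (j : Int) =>
          List.foldl (fun (st : List (List (List Int)) × Int) (k : Int) =>
            let a := PySem.List.pyGetD perm i 0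
            let b := PySem.List.pyGetD perm j 0
            let c := PySem.List.pyGetD perm k 0
            if pattern = [1, 2, 3] ∧ a < b ∧ b < c then (st.1 ++ [[[i, j, k], [a, b, c]]], st.2 + 1)
            else if pattern = [2, 3, 1] ∧ a < b ∧ b > c ∧ a > c then (st.1 ++ [[[i, j, k], [a, b, c]]], st.2 + 1)
            else if pattern = [3, 1, 2] ∧ a > b ∧ b < c ∧ a > c then (st.1 ++ [[[i, j, k], [a, b, c]]], st.2 + 1)
            else if pattern = [1, 3, 2] ∧ a < b ∧ b > c ∧ a < c then (st.1 ++ [[[i, j, k], [a, b, c]]], st.2 + 1)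
            else if pattern = [2, 1, 3] ∧ a > b ∧ b < c ∧ a < c then (st.1 ++ [[[i, j, k], [a, b, c]]], st.2 + 1)
            else if pattern = [3, 2, 1] ∧ a > b ∧ b > c then (st.1 ++ [[[i, j, k], [a, b, c]]], st.2 + 1)
            else st) st (PySem.List.pyRange (j + 1) (perm.length : Int) 1))
          st (PySem.List.pyRange (i + 1) ((perm.length : Int) - 1) 1))
    (pvI perm pattern)
    (fun l c i => pv_trackj perm pattern i l c)
    (PySem.List.pyRange 0 ((perm.length : Int) - 2) 1) [] 0
  show (if (List.foldl (fun (st : List (List (List Int)) × Int) (i : Int) =>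
        List.foldl (fun (st : List (List (List Int)) × Int) (j : Int) =>
          List.foldl (fun (st : List (List (List Int)) × Int) (k : Int) =>
            let a := PySem.List.pyGetD perm i 0
            let b := PySem.List.pyGetD perm j 0
            let c := PySem.List.pyGetD perm k 0
            if pattern = [1, 2, 3] ∧ a < b ∧ b < c then (st.1 ++ [[[i, j, k], [a, b, c]]], st.2 + 1)
            else if pattern = [2, 3, 1] ∧ a < b ∧ b > c ∧ a > c then (st.1 ++ [[[i, j, k], [a, b, c]]], st.2 + 1)
            else if pattern = [3, 1, 2] ∧ a > b ∧ b < c ∧ a > c then (st.1 ++ [[[i, j, k], [a, b, c]]], st.2 + 1)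
            else if pattern = [1, 3, 2] ∧ a < b ∧ b > c ∧ a < c then (st.1 ++ [[[i, j, k], [a, b, c]]], st.2 + 1)
            else if pattern = [2, 1, 3] ∧ a > b ∧ b < c ∧ a < c then (st.1 ++ [[[i, j, k], [a, b, c]]], st.2 + 1)
            else if pattern = [3, 2, 1] ∧ a > b ∧ b > c then (st.1 ++ [[[i, j, k], [a, b, c]]], st.2 + 1)
            else st) st (PySem.List.pyRange (j + 1) (perm.length : Int) 1))
          st (PySem.List.pyRange (i + 1) ((perm.length : Int) - 1) 1))
        ([], 0) (PySem.List.pyRange 0 ((perm.length : Int) - 2) 1)).2 ≠ 0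
      then (List.foldl (fun (st : List (List (List Int)) × Int) (i : Int) =>
        List.foldl (fun (st : List (List (List Int)) × Int) (j : Int) =>
          List.foldl (fun (st : List (List (List Int)) × Int) (k : Int) =>
            let a := PySem.List.pyGetD perm i 0
            let b := PySem.List.pyGetD perm j 0
            let c := PySem.List.pyGetD perm k 0
            if pattern = [1, 2, 3] ∧ a < b ∧ b < c then (st.1 ++ [[[i, j, k], [a, b, c]]], st.2 + 1)
            else if pattern = [2, 3, 1] ∧ a < b ∧ b > c ∧ a > c then (st.1 ++ [[[i, j, k], [a, b, c]]], st.2 + 1)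
            else if pattern = [3, 1, 2] ∧ a > b ∧ b < c ∧ a > c then (st.1 ++ [[[i, j, k], [a, b, c]]], st.2 + 1)
            else if pattern = [1, 3, 2] ∧ a < b ∧ b > c ∧ a < c then (st.1 ++ [[[i, j, k], [a, b, c]]], st.2 + 1)
            else if pattern = [2, 1, 3] ∧ a > b ∧ b < c ∧ a < c then (st.1 ++ [[[i, j, k], [a, b, c]]], st.2 + 1)
            else if pattern = [3, 2, 1] ∧ a > b ∧ b > c then (st.1 ++ [[[i, j, k], [a, b, c]]], st.2 + 1)
            else st) st (PySem.List.pyRange (j + 1) (perm.length : Int) 1))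
          st (PySem.List.pyRange (i + 1) ((perm.length : Int) - 1) 1))
        ([], 0) (PySem.List.pyRange 0 ((perm.length : Int) - 2) 1)).1 else [])
      = List.foldl (pvI perm pattern) [] (PySem.List.pyRange 0 ((perm.length : Int) - 2) 1)
  rw [h]
  cases hfold : List.foldl (pvI perm pattern) [] (PySem.List.pyRange 0 ((perm.length : Int) - 2) 1) with
  | nil => simp
  | cons x xs => simp; omega

-- fold levels as filter/map/flatMap blocks
theorem pv_J_eq (perm pattern : List Int) (i : Int) (l : List (List (List Int))) (j : Int) :
    pvJ perm pattern i l j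
      = l ++ ((PySem.List.pyRange (j + 1) (perm.length : Int) 1).filter (fun k =>
          pvCond pattern (PySem.List.pyGetD perm i 0) (PySem.List.pyGetD perm j 0)
            (PySem.List.pyGetD perm k 0))).map (pvE perm i j) := by
  simp only [pvJ]
  exact PySem.List.foldl_append_if _ _ _ _

theorem pv_I_eq (perm pattern : List Int) (l : List (List (List Int))) (i : Int) :
    pvI perm pattern l i
      = l ++ (PySem.List.pyRange (i + 1) ((perm.length : Int) - 1) 1).flatMap (fun j =>
          ((PySem.List.pyRange (j + 1) (perm.length : Int) 1).filter (fun k =>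
            pvCond pattern (PySem.List.pyGetD perm i 0) (PySem.List.pyGetD perm j 0)
              (PySem.List.pyGetD perm k 0))).map (pvE perm i j)) := by
  simp only [pvI]
  rw [show pvJ perm pattern i = (fun l j => l ++ ((PySem.List.pyRange (j + 1) (perm.length : Int) 1).filter (fun k =>
          pvCond pattern (PySem.List.pyGetD perm i 0) (PySem.List.pyGetD perm j 0)
            (PySem.List.pyGetD perm k 0))).map (pvE perm i j)) from funext fun l => funext fun j => pv_J_eq perm pattern i l j]
  exact PySem.List.foldl_append_eq_flatMap _ _ _

theorem pv_A_flat (perm pattern : List Int) :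
    locate_all_indices perm pattern
      = (PySem.List.pyRange 0 ((perm.length : Int) - 2) 1).flatMap (fun i =>
          (PySem.List.pyRange (i + 1) ((perm.length : Int) - 1) 1).flatMap (fun j =>
            ((PySem.List.pyRange (j + 1) (perm.length : Int) 1).filter (fun k =>
              pvCond pattern (PySem.List.pyGetD perm i 0) (PySem.List.pyGetD perm j 0)
                (PySem.List.pyGetD perm k 0))).map (pvE perm i j))) := by
  rw [pv_A_eq_fold]
  rw [show pvI perm pattern = (fun l i => l ++ (PySem.List.pyRange (i + 1) ((perm.length : Int) - 1) 1).flatMap (fun j =>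
          ((PySem.List.pyRange (j + 1) (perm.length : Int) 1).filter (fun k =>
            pvCond pattern (PySem.List.pyGetD perm i 0) (PySem.List.pyGetD perm j 0)
              (PySem.List.pyGetD perm k 0))).map (pvE perm i j))) from funext fun l => funext fun i => pv_I_eq perm pattern l i]
  rw [PySem.List.foldl_append_eq_flatMap]
  simp

-- flatMap over a filtered list = flatMap with an emptying guard
theorem pv_flatMap_filter {α β : Type} (l : List α) (p : α → Bool) (g : α → List β) :
    (l.filter p).flatMap g = l.flatMap (fun x => if p x then g x else []) := by
  induction l with
  | nil => rfl
  | cons x xs ih =>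
    by_cases h : p x <;> simp [h, ih]

-- a pattern sorting to [1,2,3] is one of the six literal patterns
theorem pv_sorted_cases (pattern : List Int)
    (hs : PySem.List.sorted pattern (fun x => x) false = [1, 2, 3]) :
    pattern = [1, 2, 3] ∨ pattern = [1, 3, 2] ∨ pattern = [2, 1, 3] ∨
    pattern = [2, 3, 1] ∨ pattern = [3, 1, 2] ∨ pattern = [3, 2, 1] := by
  have hp : ([1, 2, 3] : List Int).Perm pattern := hs ▸ PySem.List.sorted_perm pattern (fun x => x) false
  have hl : pattern.length = 3 := by simpa using hp.length_eq.symm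
  match pattern, hl with
  | [x, y, z], _ =>
    have hx : x ∈ ([1, 2, 3] : List Int) := hp.mem_iff.mpr (by simp)
    have hy : y ∈ ([1, 2, 3] : List Int) := hp.mem_iff.mpr (by simp)
    have hz : z ∈ ([1, 2, 3] : List Int) := hp.mem_iff.mpr (by simp)
    simp only [List.mem_cons, List.not_mem_nil, or_false] at hx hy hz
    rcases hx with rfl | rfl | rfl <;> rcases hy with rfl | rfl | rfl <;>
      rcases hz with rfl | rfl | rfl <;> revert hp <;> decide

-- an unsortable pattern matches nothing
theorem pv_cond_false (pattern : List Int)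
    (hs : ¬ PySem.List.sorted pattern (fun x => x) false = [1, 2, 3]) (a b c : Int) :
    pvCond pattern a b c = false := by
  simp only [pvCond, decide_eq_false_iff_not]
  rintro (⟨rfl, -⟩ | ⟨rfl, -⟩ | ⟨rfl, -⟩ | ⟨rfl, -⟩ | ⟨rfl, -⟩ | ⟨rfl, -⟩) <;> exact hs (by decide)

-- B after the guard, in flatMap form with its signature booleans abstracted
theorem pv_B_flat (perm pattern : List Int)
    (hs : PySem.List.sorted pattern (fun x => x) false = [1, 2, 3]) (w01 w12 w02 : Bool)
    (h1 : w01 = decide (PySem.List.pyGetD pattern 0 0 < PySem.List.pyGetD pattern 1 0))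
    (h2 : w12 = decide (PySem.List.pyGetD pattern 1 0 < PySem.List.pyGetD pattern 2 0))
    (h3 : w02 = decide (PySem.List.pyGetD pattern 0 0 < PySem.List.pyGetD pattern 2 0)) :
    locate_all_indices_alt perm pattern
      = (PySem.List.pyRange 0 ((perm.length : Int) - 2) 1).flatMap (fun i =>
          (PySem.List.pyRange (i + 1) ((perm.length : Int) - 1) 1).flatMap (fun j =>
            if (PySem.List.pyGetD perm i 0 != PySem.List.pyGetD perm j 0) &&
               (decide (PySem.List.pyGetD perm i 0 < PySem.List.pyGetD perm j 0) == w01) then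
              ((PySem.List.pyRange (j + 1) (perm.length : Int) 1).filter (fun k =>
                (PySem.List.pyGetD perm j 0 != PySem.List.pyGetD perm k 0) &&
                (PySem.List.pyGetD perm i 0 != PySem.List.pyGetD perm k 0) &&
                (decide (PySem.List.pyGetD perm j 0 < PySem.List.pyGetD perm k 0) == w12) &&
                (decide (PySem.List.pyGetD perm i 0 < PySem.List.pyGetD perm k 0) == w02))).map (pvE perm i j)
            else [])) := by
  subst h1 h2 h3
  unfold locate_all_indices_alt
  rw [if_neg (not_not_intro hs)]
  simp only [List.map_flatMap, List.flatMap_map, List.flatMap_assoc, pv_flatMap_filter]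
  simp only [apply_ite (List.map (fun t : Int × Int × Int =>
    [[t.1, t.2.1, t.2.2], [PySem.List.pyGetD perm t.1 0, PySem.List.pyGetD perm t.2.1 0, PySem.List.pyGetD perm t.2.2 0]])), List.map_map, List.map_nil]
  congr 1

-- the j-level block of A equals B's guarded block, given the per-triple split of the condition
theorem pv_point (perm : List Int) (i j : Int) (P : Int → Int → Int → Bool) (w01 w12 w02 : Bool)
    (hsplit : ∀ a b c : Int, P a b c
      = (((a != b) && (decide (a < b) == w01)) &&
         ((b != c) && (a != c) && (decide (b < c) == w12) && (decide (a < c) == w02)))) :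
    ((PySem.List.pyRange (j + 1) (perm.length : Int) 1).filter (fun k =>
        P (PySem.List.pyGetD perm i 0) (PySem.List.pyGetD perm j 0) (PySem.List.pyGetD perm k 0))).map (pvE perm i j)
      = if (PySem.List.pyGetD perm i 0 != PySem.List.pyGetD perm j 0) &&
           (decide (PySem.List.pyGetD perm i 0 < PySem.List.pyGetD perm j 0) == w01) then
          ((PySem.List.pyRange (j + 1) (perm.length : Int) 1).filter (fun k =>
            (PySem.List.pyGetD perm j 0 != PySem.List.pyGetD perm k 0) &&
            (PySem.List.pyGetD perm i 0 != PySem.List.pyGetD perm k 0) &&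
            (decide (PySem.List.pyGetD perm j 0 < PySem.List.pyGetD perm k 0) == w12) &&
            (decide (PySem.List.pyGetD perm i 0 < PySem.List.pyGetD perm k 0) == w02))).map (pvE perm i j)
        else [] := by
  by_cases hp : ((PySem.List.pyGetD perm i 0 != PySem.List.pyGetD perm j 0) &&
      (decide (PySem.List.pyGetD perm i 0 < PySem.List.pyGetD perm j 0) == w01)) = true
  · rw [if_pos hp]
    congr 1
    apply List.filter_congr
    intro k _
    rw [hsplit, hp, Bool.true_and]
  · rw [if_neg hp]
    have hnil : (PySem.List.pyRange (j + 1) (perm.length : Int) 1).filter (fun k =>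
        P (PySem.List.pyGetD perm i 0) (PySem.List.pyGetD perm j 0) (PySem.List.pyGetD perm k 0)) = [] := by
      rw [List.filter_eq_nil_iff]
      intro k _
      rw [hsplit]
      simp only [Bool.not_eq_true] at hp
      simp [hp]
    rw [hnil, List.map_nil]

theorem locate_all_indices_eq (perm pattern : List Int) :
    locate_all_indices perm pattern = locate_all_indices_alt perm pattern := by
  by_cases hs : PySem.List.sorted pattern (fun x => x) false = [1, 2, 3]
  · rw [pv_A_flat]
    rcases pv_sorted_cases pattern hs with rfl | rfl | rfl | rfl | rfl | rfl
    · rw [pv_B_flat perm _ hs true true true (by decide) (by decide) (by decide)]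
      congr 1; funext i; congr 1; funext j
      exact pv_point perm i j (pvCond [1, 2, 3]) true true true
        (by intro a b c; rw [Bool.eq_iff_iff]; simp [pvCond]; omega)
    · rw [pv_B_flat perm _ hs true false true (by decide) (by decide) (by decide)]
      congr 1; funext i; congr 1; funext j
      exact pv_point perm i j (pvCond [1, 3, 2]) true false true
        (by intro a b c; rw [Bool.eq_iff_iff]; simp [pvCond]; omega)
    · rw [pv_B_flat perm _ hs false true true (by decide) (by decide) (by decide)]
      congr 1; funext i; congr 1; funext j
      exact pv_point perm i j (pvCond [2, 1, 3]) false true true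
        (by intro a b c; rw [Bool.eq_iff_iff]; simp [pvCond]; omega)
    · rw [pv_B_flat perm _ hs true false false (by decide) (by decide) (by decide)]
      congr 1; funext i; congr 1; funext j
      exact pv_point perm i j (pvCond [2, 3, 1]) true false false
        (by intro a b c; rw [Bool.eq_iff_iff]; simp [pvCond]; omega)
    · rw [pv_B_flat perm _ hs false true false (by decide) (by decide) (by decide)]
      congr 1; funext i; congr 1; funext j
      exact pv_point perm i j (pvCond [3, 1, 2]) false true false
        (by intro a b c; rw [Bool.eq_iff_iff]; simp [pvCond]; omega)
    · rw [pv_B_flat perm _ hs false false false (by decide) (by decide) (by decide)]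
      congr 1; funext i; congr 1; funext j
      exact pv_point perm i j (pvCond [3, 2, 1]) false false false
        (by intro a b c; rw [Bool.eq_iff_iff]; simp [pvCond]; omega)
  · rw [pv_A_flat]
    unfold locate_all_indices_alt
    rw [if_pos hs]
    simp [pv_cond_false pattern hs]

-- ===== VERDICT (by name: the statement is the Claim_ definition above) =====
theorem locate_all_indices_spec : Claim_equal_locate_all_indices := by
  intro perm pattern _
  unfold Spec_locate_all_indices
  exact locate_all_indices_eq perm pattern
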